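-- pv_equiv track=rewrite | github.com/Lautiim/ayed1-2025-tps | TP3/Ejercicio_05.py | butacas_libres
-- ===== SOURCE A (Python) =====
-- def butacas_libres(sala: list[list[bool]]) -> int:
--     """Funcion para consultar cuantas butacas desocupadas (False) hay en la sala.
--
--     Pre: Recibe la matriz de la sala.
--
--     Post: Devuelve la cantidad de butacas libres (False).
--     """
--     assert len(sala) > 0, "La sala no debe estar vacía."
--
--     butacas_libres = 0
--
--     for fila in sala: # Recorremos las filas de la sala
--         for butaca in fila: # Recorremos las butacas de una fila
--             if not butaca:  # Si la butaca esta libre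
--                 butacas_libres += 1
--
--     return butacas_libres
-- ===== SOURCE B (Python) =====
-- def butacas_libres(sala: list[list[bool]]) -> int:
--     """Cantidad de butacas libres (False), por recursion sobre las filas."""
--     assert len(sala) > 0, "La sala no debe estar vacía."
--     if len(sala) == 1:
--         return sala[0].count(False)
--     return sala[0].count(False) + butacas_libres(sala[1:])
-- ===== Notes on version B (the rewrite author's own statement) =====
-- stated objective: alternative
-- what changed: Replaces the iterative nested loop with an explicit per-seat conditional by structural recursion on the rows, each row's free seats obtained by the built-in list.count(False) instead of a conditional accumulator.
import Mathlib
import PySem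

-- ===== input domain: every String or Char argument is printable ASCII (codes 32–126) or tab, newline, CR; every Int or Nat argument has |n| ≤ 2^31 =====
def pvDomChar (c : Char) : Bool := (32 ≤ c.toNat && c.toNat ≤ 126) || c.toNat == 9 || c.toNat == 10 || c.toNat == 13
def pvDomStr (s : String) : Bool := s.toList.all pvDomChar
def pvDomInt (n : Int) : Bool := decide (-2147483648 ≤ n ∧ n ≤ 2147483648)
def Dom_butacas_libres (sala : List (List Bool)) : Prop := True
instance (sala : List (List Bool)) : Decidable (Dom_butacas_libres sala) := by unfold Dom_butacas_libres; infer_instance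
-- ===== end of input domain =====

-- B counts the free seats by structural recursion on the rows, using list.count(False)
-- per row instead of A's iterative nested loop with a per-seat conditional accumulator.

-- ===== PORT A =====
-- nested loop: for fila in sala: for butaca in fila: if not butaca: butacas_libres += 1
def butacas_libres (sala : List (List Bool)) : Int :=
  sala.foldl (fun acc fila =>
    fila.foldl (fun acc' butaca => if !butaca then acc' + 1 else acc') acc) 0

-- ===== PORT B =====
-- if len(sala) == 1: return sala[0].count(False)
-- return sala[0].count(False) + butacas_libres(sala[1:])
-- ([] is unreachable: B's assert raises there, excluded by Pre_)
def butacas_libres_alt : List (List Bool) → Int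
  | [] => 0
  | [fila] => PySem.List.count fila false
  | fila :: resto => PySem.List.count fila false + butacas_libres_alt resto

-- ===== PRECONDITION & SPEC =====
-- A (and B) assert len(sala) > 0: AssertionError on [], so [] is excluded.
def Pre_butacas_libres (sala : List (List Bool)) : Prop := sala ≠ []
instance (sala : List (List Bool)) : Decidable (Pre_butacas_libres sala) := by unfold Pre_butacas_libres; infer_instance
def pvWitness_butacas_libres : List (List Bool) := [[true, false], [false]]
def Spec_butacas_libres (sala : List (List Bool)) (out : Int) : Prop := out = butacas_libres_alt sala
instance (sala : List (List Bool)) (out : Int) : Decidable (Spec_butacas_libres sala out) := by unfold Spec_butacas_libres; infer_instance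

-- ===== CLAIM (what is proved, stated in full; the proofs are below) =====
def Claim_equal_butacas_libres : Prop := ∀ (sala : List (List Bool)), Dom_butacas_libres sala → Pre_butacas_libres sala → Spec_butacas_libres sala (butacas_libres sala)

-- ===== LEMMAS AND PROOFS =====

-- one row of A's inner loop adds the row's count of false to the accumulator
lemma row_count (fila : List Bool) (acc : Int) :
    fila.foldl (fun acc' butaca => if !butaca then acc' + 1 else acc') acc
      = acc + (fila.count false : Int) := by
  induction fila generalizing acc with
  | nil => simp
  | cons b t ih =>
    rw [List.foldl_cons, ih]
    cases b <;> simp [List.count_cons] <;> ring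

-- B on a nonempty list is the sum of per-row false counts; A's fold from acc adds the same
lemma fold_eq (sala : List (List Bool)) (acc : Int) (h : sala ≠ []) :
    sala.foldl (fun acc fila =>
      fila.foldl (fun acc' butaca => if !butaca then acc' + 1 else acc') acc) acc
      = acc + butacas_libres_alt sala := by
  induction sala generalizing acc with
  | nil => exact absurd rfl h
  | cons f t ih =>
    rw [List.foldl_cons, row_count]
    cases t with
    | nil => simp [butacas_libres_alt, PySem.List.count_eq]
    | cons f' t' =>
      rw [ih _ (by simp),
        show butacas_libres_alt (f :: f' :: t')
            = PySem.List.count f false + butacas_libres_alt (f' :: t') from rfl,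
        PySem.List.count_eq]
      ring

-- ===== VERDICT (by name: the statement is the Claim_ definition above) =====
theorem butacas_libres_spec : Claim_equal_butacas_libres := by
  intro sala _ h
  unfold Spec_butacas_libres butacas_libres
  rw [fold_eq sala 0 h]
  ring
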